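-- pv_equiv track=rewrite | github.com/arhaverly/CyberML | text_similarity.py | find_collect_section_name
-- ===== SOURCE A (Python) =====
-- def find_collect_section_name(table_of_contents):
--     collect_section = False
--     next_section = False
--     for section in table_of_contents:
--         if collect_section != False:
--             next_section = section
--             break
--         if 'collect' in section:
--             collect_section = section
--
--
--     if collect_section == False:
--         raise Exception("Didn't find collection section")
--
--     return collect_section, next_section
-- ===== SOURCE B (Python) =====
-- def find_collect_section_name(table_of_contents):
--     if not table_of_contents:
--         raise Exception("Didn't find collection section")
--     head, *rest = table_of_contents
--     if 'collect' in head: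
--         return head, rest[0]
--     return find_collect_section_name(rest)
-- ===== Notes on version B (the rewrite author's own statement) =====
-- stated objective: simpler
-- what changed: Replaced A's flag-based two-phase loop (set collect_section, take one more iteration to capture the successor, post-check the flag) by a direct structural recursion that, at the first 'collect' match, returns the head together with the first element of the remaining tail.
-- outside the precondition, e.g. on find_collect_section_name(['collect data']): A returns ('collect data', False), B raises IndexError
import Mathlib
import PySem

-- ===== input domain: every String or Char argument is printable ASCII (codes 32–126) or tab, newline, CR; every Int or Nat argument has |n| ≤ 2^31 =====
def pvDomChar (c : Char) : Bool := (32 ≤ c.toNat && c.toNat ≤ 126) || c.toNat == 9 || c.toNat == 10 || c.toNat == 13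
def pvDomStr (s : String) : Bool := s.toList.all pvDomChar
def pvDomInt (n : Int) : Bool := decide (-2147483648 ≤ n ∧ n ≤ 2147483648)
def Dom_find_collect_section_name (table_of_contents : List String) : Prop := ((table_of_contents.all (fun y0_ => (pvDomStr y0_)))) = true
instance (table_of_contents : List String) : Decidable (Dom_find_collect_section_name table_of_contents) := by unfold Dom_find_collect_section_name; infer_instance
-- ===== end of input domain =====

-- ===== PORT A =====
-- Header: B replaces A's flag-based scan (set the flag, loop once more for the successor,
-- post-check) by a direct recursion returning (first 'collect' section, first element of the
-- remaining tail); equivalence is about return values on Pre_ (A mutates nothing).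

-- the test 'collect' in section, shared by both ports and Pre_
def pvHasCollect (s : String) : Bool := PySem.Str.isIn "collect" s

-- literal transliteration of A's loop: state = (collect_section, next_section), False ↦ none
def pvLoopA : List String → Option String → Option String → Option String × Option String
  | [], c, n => (c, n)
  | s :: rest, c, n =>
    if c.isSome then (c, some s)                        -- 'if collect_section != False: next_section = section; break'
    else if pvHasCollect s then pvLoopA rest (some s) n
    else pvLoopA rest c n

def find_collect_section_name (table_of_contents : List String) : String × String :=
  match pvLoopA table_of_contents none none with
  | (some c, n) => (c, n.getD "")    -- next_section may still be False (= none): outside Pre_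
  | (none, _) => ("", "")            -- Python raises Exception here: outside Pre_

-- ===== PORT B =====
def find_collect_section_name_alt : List String → String × String
  | [] => ("", "")                   -- Python raises Exception here: outside Pre_
  | head :: rest =>
    if pvHasCollect head then (head, (PySem.List.pyGet? rest 0).getD "")  -- rest[0]; IndexError outside Pre_
    else find_collect_section_name_alt rest

-- ===== PRECONDITION & SPEC =====
-- Pre_ excludes exactly: (a) inputs with no section containing 'collect', where A raises
-- Exception, and (b) inputs whose FIRST 'collect' section is the last element, where A returns
-- (section, False) — a bool where a string is expected (not a value of the declared type; B
-- raises IndexError there).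
def Pre_find_collect_section_name (table_of_contents : List String) : Prop :=
  table_of_contents.findIdx pvHasCollect + 1 < table_of_contents.length
instance (table_of_contents : List String) : Decidable (Pre_find_collect_section_name table_of_contents) := by unfold Pre_find_collect_section_name; infer_instance

def pvWitness_find_collect_section_name : List String := ["1. intro", "2. data collection", "3. results"]

def Spec_find_collect_section_name (table_of_contents : List String) (out : String × String) : Prop := out = find_collect_section_name_alt table_of_contents
instance (table_of_contents : List String) (out : String × String) : Decidable (Spec_find_collect_section_name table_of_contents out) := by unfold Spec_find_collect_section_name; infer_instance

-- ===== CLAIM (what is proved, stated in full; the proofs are below) =====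
def Claim_equal_find_collect_section_name : Prop := ∀ (table_of_contents : List String), Dom_find_collect_section_name table_of_contents → Pre_find_collect_section_name table_of_contents → Spec_find_collect_section_name table_of_contents (find_collect_section_name table_of_contents)

-- ===== LEMMAS AND PROOFS =====

-- once the flag is set, A's loop grabs the head of the remainder (or keeps n) and stops
theorem pvLoopA_some (rest : List String) (s : String) (n : Option String) :
    pvLoopA rest (some s) n = (some s, match rest with | [] => n | r :: _ => some r) := by
  cases rest <;> simp [pvLoopA]

-- the two ports agree on EVERY input (outside Pre_ both use the "" convention)
theorem pv_ports_eq (toc : List String) :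
    find_collect_section_name toc = find_collect_section_name_alt toc := by
  induction toc with
  | nil => rfl
  | cons s rest ih =>
    by_cases h : pvHasCollect s = true
    · simp [find_collect_section_name, find_collect_section_name_alt, pvLoopA, h, pvLoopA_some]
      cases rest <;> simp [PySem.List.pyGet?, PySem.List.pyIdx?]
    · simpa [find_collect_section_name, find_collect_section_name_alt, pvLoopA, h] using ih

-- ===== VERDICT (by name: the statement is the Claim_ definition above) =====
theorem find_collect_section_name_spec : Claim_equal_find_collect_section_name := by
  intro toc _ _
  exact pv_ports_eq toc
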